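-- pv_equiv track=rewrite | github.com/DrJinHoChoi/IronDome-DOA-Tracking | tests/generate_tracking_ablation.py | count_track_switches
-- ===== SOURCE A (Python) =====
-- def count_track_switches(label_hist, l2s, K, N_SCANS):
--     """Count how many times a track switches its identity assignment."""
--     # For each scan, check which label is assigned to which source
--     source_to_labels = {k: [] for k in range(K)}
--     for si, tlh in enumerate(label_hist):
--         for label, (state, _, _) in tlh.items():
--             src = l2s.get(label, -1)
--             if 0 <= src < K:
--                 source_to_labels[src].append((si, label))
--
--     switches = 0
--     for k in range(K):
--         labels = source_to_labels[k]
--         for i in range(1, len(labels)):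
--             if labels[i][1] != labels[i-1][1]:
--                 switches += 1
--     return switches
-- ===== SOURCE B (Python) =====
-- def count_track_switches(label_hist, l2s, K, N_SCANS):
--     """Count how many times a track switches its identity assignment."""
--     switches = 0
--     last = {}  # src -> last label assigned to it
--     for tlh in label_hist:
--         for label in tlh:
--             src = l2s.get(label, -1)
--             if 0 <= src < K:
--                 if src in last and last[src] != label:
--                     switches += 1
--                 last[src] = label
--     return switches
-- ===== Notes on version B (the rewrite author's own statement) =====
-- stated objective: simpler
-- what changed: Replaced A's two-phase algorithm (build per-source label lists keyed by range(K), then a second K-loop counting adjacent label changes by index) with a single streaming pass that keeps only the last label seen per source and increments on change.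
import Mathlib
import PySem

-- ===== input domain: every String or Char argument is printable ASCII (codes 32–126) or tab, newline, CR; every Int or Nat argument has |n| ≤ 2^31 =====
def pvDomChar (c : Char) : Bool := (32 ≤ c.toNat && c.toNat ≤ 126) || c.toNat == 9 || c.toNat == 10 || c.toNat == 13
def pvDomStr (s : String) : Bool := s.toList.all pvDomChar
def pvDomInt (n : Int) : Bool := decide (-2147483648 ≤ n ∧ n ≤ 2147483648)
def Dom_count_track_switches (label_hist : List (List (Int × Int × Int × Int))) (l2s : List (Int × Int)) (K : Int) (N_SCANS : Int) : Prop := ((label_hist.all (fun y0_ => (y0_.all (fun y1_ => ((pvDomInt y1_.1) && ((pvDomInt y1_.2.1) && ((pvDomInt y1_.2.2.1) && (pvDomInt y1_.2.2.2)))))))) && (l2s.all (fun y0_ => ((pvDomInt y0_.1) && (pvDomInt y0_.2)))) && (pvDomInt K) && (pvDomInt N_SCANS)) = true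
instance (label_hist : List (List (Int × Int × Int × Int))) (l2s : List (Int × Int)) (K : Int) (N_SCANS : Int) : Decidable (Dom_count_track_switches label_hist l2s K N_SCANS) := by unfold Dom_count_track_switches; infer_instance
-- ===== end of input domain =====

-- B replaces A's two-phase group-then-count (per-source label lists, then a second K-loop of
-- adjacent comparisons) by a single streaming pass keeping only the last label per source (objective: simpler).

-- ===== PORT A =====
def count_track_switches (label_hist : List (List (Int × Int × Int × Int))) (l2s : List (Int × Int)) (K : Int) (N_SCANS : Int) : Int :=
  -- source_to_labels = {k: [] for k in range(K)}
  let d0 : PySem.Dict Int (List (Int × Int)) :=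
    (PySem.List.pyRange 0 K 1).foldl (fun d k => d.insert k []) PySem.Dict.empty
  -- for si, tlh in enumerate(label_hist): for label, (state,_,_) in tlh.items(): …
  let stl : PySem.Dict Int (List (Int × Int)) :=
    (PySem.List.enumerate label_hist 0).foldl (fun d p =>
      p.2.foldl (fun d q =>
        let src := (PySem.Dict.mk l2s).getD q.1 (-1)
        if 0 ≤ src ∧ src < K then d.modify src [] (· ++ [(p.1, q.1)]) else d) d) d0
  -- switches = 0; for k in range(K): … for i in range(1, len(labels)): …
  (PySem.List.pyRange 0 K 1).foldl (fun sw k =>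
    let labels := stl.getD k []
    (PySem.List.pyRange 1 (labels.length : Int) 1).foldl (fun sw i =>
      if (PySem.List.pyGetD labels i (0, 0)).2 ≠ (PySem.List.pyGetD labels (i - 1) (0, 0)).2
      then sw + 1 else sw) sw) 0

-- ===== PORT B =====
def count_track_switches_alt (label_hist : List (List (Int × Int × Int × Int))) (l2s : List (Int × Int)) (K : Int) (N_SCANS : Int) : Int :=
  -- switches = 0; last = {}; for tlh in label_hist: for label in tlh: …
  (label_hist.foldl (fun (st : Int × PySem.Dict Int Int) tlh =>
    tlh.foldl (fun st q =>
      let src := (PySem.Dict.mk l2s).getD q.1 (-1)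
      if 0 ≤ src ∧ src < K then
        let sw := if st.2.contains src ∧ st.2.get? src ≠ some q.1 then st.1 + 1 else st.1
        (sw, st.2.insert src q.1)
      else st) st)
    (0, PySem.Dict.empty)).1

-- ===== PRECONDITION & SPEC =====
def Spec_count_track_switches (label_hist : List (List (Int × Int × Int × Int))) (l2s : List (Int × Int)) (K : Int) (N_SCANS : Int) (out : Int) : Prop := out = count_track_switches_alt label_hist l2s K N_SCANS
instance (label_hist : List (List (Int × Int × Int × Int))) (l2s : List (Int × Int)) (K : Int) (N_SCANS : Int) (out : Int) : Decidable (Spec_count_track_switches label_hist l2s K N_SCANS out) := by unfold Spec_count_track_switches; infer_instance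

-- ===== CLAIM (what is proved, stated in full; the proofs are below) =====
def Claim_equal_count_track_switches : Prop := ∀ (label_hist : List (List (Int × Int × Int × Int))) (l2s : List (Int × Int)) (K : Int) (N_SCANS : Int), Dom_count_track_switches label_hist l2s K N_SCANS → Spec_count_track_switches label_hist l2s K N_SCANS (count_track_switches label_hist l2s K N_SCANS)

-- ===== LEMMAS AND PROOFS =====

-- number of adjacent positions with different labels
def ctsAdj : List Int → Int
  | [] => 0
  | [_] => 0
  | a :: b :: t => (if b ≠ a then 1 else 0) + ctsAdj (b :: t)

lemma ctsAdj_append_singleton (l : List Int) (x : Int) :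
    ctsAdj (l ++ [x]) = ctsAdj l + (match l.getLast? with
      | none => 0
      | some a => if x ≠ a then 1 else 0) := by
  induction l with
  | nil => simp [ctsAdj]
  | cons a t ih =>
    cases t with
    | nil => simp [ctsAdj]
    | cons b t' =>
      simp only [List.cons_append, ctsAdj] at *
      rw [ih]
      simp [List.getLast?_cons_cons]
      omega

-- A's inner i-loop computes ctsAdj of the label sequence
lemma cts_inner_loop (labels : List (Int × Int)) (acc : Int) :
    (PySem.List.pyRange 1 (labels.length : Int) 1).foldl (fun sw i =>
      if (PySem.List.pyGetD labels i (0, 0)).2 ≠ (PySem.List.pyGetD labels (i - 1) (0, 0)).2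
      then sw + 1 else sw) acc = acc + ctsAdj (labels.map (·.2)) := by
  induction labels using List.reverseRecOn with
  | nil => simp [ctsAdj, PySem.List.pyRange_one_eq_nil]
  | append_singleton l x ih =>
    rcases eq_or_ne l [] with rfl | hne
    · simp [ctsAdj, PySem.List.pyRange_one_eq_nil]
    · have hlen : 0 < l.length := List.length_pos_iff.mpr hne
      have hsteps : ((l ++ [x]).length : Int) = (l.length : Int) + 1 := by simp
      rw [hsteps, PySem.List.pyRange_one_succ_right (by exact_mod_cast hlen),
        List.foldl_append]
      have hlast : PySem.List.pyGetD (l ++ [x]) ((l.length : Int)) (0, 0) = x := by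
        rw [PySem.List.pyGetD_natCast]
        simp
      have hprev : PySem.List.pyGetD (l ++ [x]) ((l.length : Int) - 1) (0, 0)
          = l.getLast (by exact hne) := by
        have : ((l.length : Int) - 1) = ((l.length - 1 : Nat) : Int) := by
          omega
        rw [this, PySem.List.pyGetD_natCast]
        rw [List.getD_eq_getElem?_getD, List.getElem?_append_left (by omega)]
        rw [List.getLast_eq_getElem]
        simp [List.getElem?_eq_getElem (by omega : l.length - 1 < l.length)]
      -- the first l.length-1 steps only look at indices < l.length
      have hpref : (PySem.List.pyRange 1 (l.length : Int) 1).foldl (fun sw i =>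
          if (PySem.List.pyGetD (l ++ [x]) i (0, 0)).2 ≠ (PySem.List.pyGetD (l ++ [x]) (i - 1) (0, 0)).2
          then sw + 1 else sw) acc
          = acc + ctsAdj (l.map (·.2)) := by
        rw [← ih]
        apply PySem.List.foldl_congr_mem
        intro sw i hi
        have hmem := (PySem.List.mem_pyRange_one).mp hi
        have h1 : PySem.List.pyGetD (l ++ [x]) i (0, 0) = PySem.List.pyGetD l i (0, 0) := by
          rw [PySem.List.pyGetD_eq_getElem _ _ (by omega) (by simp; omega),
            PySem.List.pyGetD_eq_getElem _ _ (by omega) (by exact_mod_cast hmem.2)]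
          exact List.getElem_append_left _
        have h2 : PySem.List.pyGetD (l ++ [x]) (i - 1) (0, 0) = PySem.List.pyGetD l (i - 1) (0, 0) := by
          rw [PySem.List.pyGetD_eq_getElem _ _ (by omega) (by simp; omega),
            PySem.List.pyGetD_eq_getElem _ _ (by omega) (by omega)]
          exact List.getElem_append_left _
        rw [h1, h2]
      rw [hpref]
      simp only [List.foldl_cons, List.foldl_nil, hlast, hprev]
      rw [List.map_append, List.map_singleton, ctsAdj_append_singleton]
      have hgl : (l.map (·.2)).getLast? = some (l.getLast hne).2 := by
        rw [List.getLast?_eq_some_getLast (by simpa using hne)]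
        simp [List.getLast_map]
      rw [hgl]
      split <;> split <;> simp_all <;> omega

-- sum over a Nodup list, function changed at one member
lemma cts_sum_update {R : List Int} (hnd : R.Nodup) {s : Int} (hs : s ∈ R)
    (f g : Int → Int) (δ : Int)
    (hne : ∀ k, k ≠ s → g k = f k) (heq : g s = f s + δ) :
    (R.map g).sum = (R.map f).sum + δ := by
  induction R with
  | nil => cases hs
  | cons a t ih =>
    rcases List.mem_cons.mp hs with rfl | hmem
    · have : ∀ k ∈ t, g k = f k := fun k hk =>
        hne k (fun h => (List.nodup_cons.mp hnd).1 (h ▸ hk))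
      simp only [List.map_cons, List.sum_cons, heq]
      rw [List.map_congr_left this]
      ring
    · have ha : a ≠ s := fun h => (List.nodup_cons.mp hnd).1 (h ▸ hmem)
      simp only [List.map_cons, List.sum_cons]
      rw [hne a ha, ih (List.nodup_cons.mp hnd).2 hmem]
      ring

-- flattened event list: (src, scan index, label) for every item of every scan
def ctsEv (label_hist : List (List (Int × Int × Int × Int))) (l2s : List (Int × Int)) :
    List (Int × Int × Int) :=
  (PySem.List.enumerate label_hist 0).flatMap (fun p =>
    p.2.map (fun q => ((PySem.Dict.mk l2s).getD q.1 (-1), p.1, q.1)))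

-- B's streaming step, phrased on events
def ctsStep (K : Int) (st : Int × PySem.Dict Int Int) (e : Int × Int × Int) :
    Int × PySem.Dict Int Int :=
  if 0 ≤ e.1 ∧ e.1 < K then
    (if st.2.contains e.1 ∧ st.2.get? e.1 ≠ some e.2.2 then st.1 + 1 else st.1,
     st.2.insert e.1 e.2.2)
  else st

-- the labels assigned to source k, in event order
def ctsLb (g : List (Int × Int × Int)) (k : Int) : List Int :=
  (g.filter (fun e => e.1 == k)).map (·.2.2)

lemma ctsLb_append (g : List (Int × Int × Int)) (e : Int × Int × Int) (k : Int) :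
    ctsLb (g ++ [e]) k = if e.1 = k then ctsLb g k ++ [e.2.2] else ctsLb g k := by
  simp only [ctsLb, List.filter_append]
  split
  · rename_i h; simp [List.filter, h]
  · rename_i h; simp [List.filter, beq_eq_false_iff_ne.mpr h]

-- A's initial dict {k: [] for k in range(K)} yields [] under every getD
lemma cts_d0_getD (l : List Int) (d : PySem.Dict Int (List (Int × Int)))
    (h : ∀ j, d.getD j [] = []) (k : Int) :
    (l.foldl (fun d k => d.insert k []) d).getD k [] = [] := by
  induction l generalizing d with
  | nil => exact h k
  | cons a t ih =>
    simp only [List.foldl_cons]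
    exact ih _ (fun j => by rw [PySem.Dict.getD_insert]; split <;> simp [h])

-- the streaming invariant + count, by reverse induction over the event list
lemma cts_stream (K : Int) (g : List (Int × Int × Int))
    (hg : ∀ e ∈ g, 0 ≤ e.1 ∧ e.1 < K) :
    (g.foldl (ctsStep K) (0, PySem.Dict.empty)).1
      = ((PySem.List.pyRange 0 K 1).map (fun k => ctsAdj (ctsLb g k))).sum ∧
    ∀ k, (g.foldl (ctsStep K) (0, PySem.Dict.empty)).2.get? k = (ctsLb g k).getLast? := by
  induction g using List.reverseRecOn with
  | nil =>
    refine ⟨?_, fun k => by simp [ctsLb, PySem.Dict.get?_empty]⟩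
    have h0 : ∀ k, ctsLb ([] : List (Int × Int × Int)) k = [] := fun k => by simp [ctsLb]
    simp [h0, ctsAdj]
  | append_singleton g e ih =>
    have hge : ∀ e' ∈ g, 0 ≤ e'.1 ∧ e'.1 < K := fun e' h => hg e' (by simp [h])
    have he : 0 ≤ e.1 ∧ e.1 < K := hg e (by simp)
    obtain ⟨ihs, ihd⟩ := ih hge
    set st := g.foldl (ctsStep K) (0, PySem.Dict.empty) with hst
    rw [List.foldl_append, List.foldl_cons, List.foldl_nil]
    have hstep : ctsStep K st e =
        ((if st.2.contains e.1 ∧ st.2.get? e.1 ≠ some e.2.2 then st.1 + 1 else st.1),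
         st.2.insert e.1 e.2.2) := by
      simp [ctsStep, he]
    rw [hstep]
    constructor
    · -- the count
      have hδ : ctsAdj (ctsLb (g ++ [e]) e.1) = ctsAdj (ctsLb g e.1) +
          (match (ctsLb g e.1).getLast? with
            | none => 0
            | some a => if e.2.2 ≠ a then 1 else 0) := by
        rw [ctsLb_append]; simp [ctsAdj_append_singleton]
      rw [cts_sum_update (PySem.List.nodup_pyRange_one 0 K)
        (PySem.List.mem_pyRange_one.mpr he)
        (fun k => ctsAdj (ctsLb g k))
        (fun k => ctsAdj (ctsLb (g ++ [e]) k))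
        (match (ctsLb g e.1).getLast? with
          | none => 0
          | some a => if e.2.2 ≠ a then 1 else 0)
        (fun k hk => by
          show ctsAdj (ctsLb (g ++ [e]) k) = ctsAdj (ctsLb g k)
          rw [ctsLb_append, if_neg (fun h => hk h.symm)])
        (by
          show ctsAdj (ctsLb (g ++ [e]) e.1) = _
          exact hδ), ← ihs]
      rw [PySem.Dict.contains_eq_isSome_get?, ihd e.1]
      cases hl : (ctsLb g e.1).getLast? with
      | none => simp
      | some a =>
        simp only [Option.isSome_some, true_and]
        split <;> rename_i hcond
        · rw [if_pos (by simpa [eq_comm] using hcond)]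
        · rw [if_neg (by simpa [eq_comm] using hcond)]; omega
    · -- the last-label invariant
      intro k
      rw [PySem.Dict.get?_insert, ctsLb_append]
      by_cases hk : k = e.1
      · subst hk; simp
      · rw [if_neg hk, if_neg (fun h => hk h.symm)]
        exact ihd k

-- A's nested grouping loop, flattened to a fold over ctsEv
lemma cts_A_group (label_hist : List (List (Int × Int × Int × Int))) (l2s : List (Int × Int))
    (K : Int) (d : PySem.Dict Int (List (Int × Int))) :
    (PySem.List.enumerate label_hist 0).foldl (fun d p =>
      p.2.foldl (fun d q =>
        let src := (PySem.Dict.mk l2s).getD q.1 (-1)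
        if 0 ≤ src ∧ src < K then d.modify src [] (· ++ [(p.1, q.1)]) else d) d) d
      = (ctsEv label_hist l2s).foldl (fun d e =>
          if 0 ≤ e.1 ∧ e.1 < K then d.modify e.1 [] (· ++ [e.2]) else d) d := by
  rw [ctsEv, List.foldl_flatMap]
  apply PySem.List.foldl_congr_mem
  intro d p _
  rw [List.foldl_map]

-- B's nested loop, flattened to the same fold over ctsEv
lemma cts_B_flat (label_hist : List (List (Int × Int × Int × Int))) (l2s : List (Int × Int))
    (K : Int) (st : Int × PySem.Dict Int Int) :
    label_hist.foldl (fun st tlh =>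
      tlh.foldl (fun st q =>
        let src := (PySem.Dict.mk l2s).getD q.1 (-1)
        if 0 ≤ src ∧ src < K then
          (if st.2.contains src ∧ st.2.get? src ≠ some q.1 then st.1 + 1 else st.1,
           st.2.insert src q.1)
        else st) st) st
      = (ctsEv label_hist l2s).foldl (ctsStep K) st := by
  rw [ctsEv, List.foldl_flatMap]
  have key : ∀ (t : List (List (Int × Int × Int × Int))) (s : Int)
      (st : Int × PySem.Dict Int Int),
      (PySem.List.enumerate t s).foldl (fun acc p =>
        (p.2.map (fun q => ((PySem.Dict.mk l2s).getD q.1 (-1), p.1, q.1))).foldl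
          (ctsStep K) acc) st
      = t.foldl (fun st tlh =>
          tlh.foldl (fun st q =>
            let src := (PySem.Dict.mk l2s).getD q.1 (-1)
            if 0 ≤ src ∧ src < K then
              (if st.2.contains src ∧ st.2.get? src ≠ some q.1 then st.1 + 1 else st.1,
               st.2.insert src q.1)
            else st) st) st := by
    intro t
    induction t with
    | nil => intro s st; simp [PySem.List.enumerate_nil]
    | cons tlh t ih =>
      intro s st
      rw [PySem.List.enumerate_cons, List.foldl_cons, List.foldl_cons, ih]
      congr 1
      rw [List.foldl_map]
      apply PySem.List.foldl_congr_mem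
      intro acc q _
      simp only [ctsStep]
  exact (key label_hist 0 st).symm

-- filtering the events inside the fold (A's grouping step keeps only in-range sources)
lemma cts_filter_fold_A (ev : List (Int × Int × Int)) (K : Int)
    (d : PySem.Dict Int (List (Int × Int))) :
    ev.foldl (fun d e => if 0 ≤ e.1 ∧ e.1 < K then d.modify e.1 [] (· ++ [e.2]) else d) d
      = (ev.filter (fun e => decide (0 ≤ e.1 ∧ e.1 < K))).foldl
          (fun d e => d.modify e.1 [] (· ++ [e.2])) d := by
  rw [List.foldl_filter]
  apply PySem.List.foldl_congr_mem
  intro d e _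
  simp only [decide_eq_true_eq]

lemma cts_filter_fold_B (ev : List (Int × Int × Int)) (K : Int)
    (st : Int × PySem.Dict Int Int) :
    ev.foldl (ctsStep K) st
      = (ev.filter (fun e => decide (0 ≤ e.1 ∧ e.1 < K))).foldl (ctsStep K) st := by
  rw [List.foldl_filter]
  apply PySem.List.foldl_congr_mem
  intro st e _
  simp only [ctsStep, decide_eq_true_eq]
  split <;> simp_all

-- ===== VERDICT (by name: the statement is the Claim_ definition above) =====
theorem count_track_switches_spec : Claim_equal_count_track_switches := by
  intro label_hist l2s K N_SCANS _
  unfold Spec_count_track_switches count_track_switches count_track_switches_alt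
  simp only []
  rw [cts_B_flat, cts_filter_fold_B, cts_A_group, cts_filter_fold_A]
  set gf := (ctsEv label_hist l2s).filter (fun e => decide (0 ≤ e.1 ∧ e.1 < K)) with hgf
  have hmem : ∀ e ∈ gf, 0 ≤ e.1 ∧ e.1 < K := by
    intro e he
    have := (List.mem_filter.mp (hgf ▸ he)).2
    simpa using this
  obtain ⟨hsum, -⟩ := cts_stream K gf hmem
  rw [hsum]
  -- A's second phase: each group's getD is the filtered label list
  have hd0 : ∀ k, ((PySem.List.pyRange 0 K 1).foldl
      (fun d k => d.insert k ([] : List (Int × Int))) PySem.Dict.empty).getD k [] = [] :=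
    fun k => cts_d0_getD _ _ (fun j => by simp [PySem.Dict.getD_empty]) k
  have hgrp : ∀ k, ((gf.foldl (fun d e => d.modify e.1 [] (· ++ [e.2]))
      ((PySem.List.pyRange 0 K 1).foldl (fun d k => d.insert k ([] : List (Int × Int)))
        PySem.Dict.empty)).getD k []).map (·.2) = ctsLb gf k := by
    intro k
    rw [PySem.Dict.getD_foldl_modify_append, hd0]
    simp [ctsLb, List.map_map]
  have hbody : ∀ k ∈ PySem.List.pyRange 0 K 1, ∀ (sw : Int),
      (PySem.List.pyRange 1 (((gf.foldl (fun d e => d.modify e.1 [] (· ++ [e.2]))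
        ((PySem.List.pyRange 0 K 1).foldl (fun d k => d.insert k ([] : List (Int × Int)))
          PySem.Dict.empty)).getD k []).length : Int) 1).foldl (fun sw i =>
        if (PySem.List.pyGetD ((gf.foldl (fun d e => d.modify e.1 [] (· ++ [e.2]))
          ((PySem.List.pyRange 0 K 1).foldl (fun d k => d.insert k ([] : List (Int × Int)))
            PySem.Dict.empty)).getD k []) i (0, 0)).2
          ≠ (PySem.List.pyGetD ((gf.foldl (fun d e => d.modify e.1 [] (· ++ [e.2]))
          ((PySem.List.pyRange 0 K 1).foldl (fun d k => d.insert k ([] : List (Int × Int)))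
            PySem.Dict.empty)).getD k []) (i - 1) (0, 0)).2
        then sw + 1 else sw) sw
      = sw + ctsAdj (ctsLb gf k) := by
    intro k _ sw
    rw [cts_inner_loop, hgrp]
  rw [PySem.List.foldl_congr_mem' _ _ _ _ hbody, PySem.List.foldl_add]
  simp [ctsLb]
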